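-- pv_equiv track=rewrite | github.com/MaxWolf-01/sentinel2-landcover-classification | src/experiments/osm_to_geotiff_example_script.py | convert_tags_for_osmnx
-- ===== SOURCE A (Python) =====
-- def convert_tags_for_osmnx(feature_tags):
--     """
--     Convert a nested dictionary of feature tags into a flat dictionary suitable for OSMnx.
--
--     Args:
--     - feature_tags (dict): A nested dictionary of feature tags.
--
--     Returns:
--     - dict[str, str]: A flat dictionary with tag keys and string values.
--     """
--     osmnx_tags = {}
--     for feature_category, tags_dict in feature_tags.items():
--         for tag_key, tag_values in tags_dict.items():
--             for tag_value in tag_values: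
--                 # Each tag value is appended to the key with a semicolon to separate multiple values
--                 if tag_key in osmnx_tags:
--                     osmnx_tags[tag_key] += ";" + tag_value
--                 else:
--                     osmnx_tags[tag_key] = tag_value
--     return osmnx_tags
-- ===== SOURCE B (Python) =====
-- def convert_tags_for_osmnx(feature_tags):
--     """Pre-join each tag entry's values into one chunk with a single ';'.join, then
--     group the flat chunk stream per key and join the chunks once more."""
--     chunks = [(k, ";".join(vs))
--               for tags_dict in feature_tags.values()
--               for k, vs in tags_dict.items()
--               if vs]
--     grouped = {}
--     for k, chunk in chunks:
--         grouped.setdefault(k, []).append(chunk)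
--     return {k: ";".join(cs) for k, cs in grouped.items()}
-- ===== Notes on version B (the rewrite author's own statement) =====
-- stated objective: alternative
-- what changed: B eliminates A's innermost per-value loop entirely: each (key, values) entry is pre-joined into one chunk string by a single ';'.join, the resulting flat chunk stream is grouped per key in one flat loop, and a final join per key produces the result, instead of A's triple-nested loop mutating dict strings per value.
import Mathlib
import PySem

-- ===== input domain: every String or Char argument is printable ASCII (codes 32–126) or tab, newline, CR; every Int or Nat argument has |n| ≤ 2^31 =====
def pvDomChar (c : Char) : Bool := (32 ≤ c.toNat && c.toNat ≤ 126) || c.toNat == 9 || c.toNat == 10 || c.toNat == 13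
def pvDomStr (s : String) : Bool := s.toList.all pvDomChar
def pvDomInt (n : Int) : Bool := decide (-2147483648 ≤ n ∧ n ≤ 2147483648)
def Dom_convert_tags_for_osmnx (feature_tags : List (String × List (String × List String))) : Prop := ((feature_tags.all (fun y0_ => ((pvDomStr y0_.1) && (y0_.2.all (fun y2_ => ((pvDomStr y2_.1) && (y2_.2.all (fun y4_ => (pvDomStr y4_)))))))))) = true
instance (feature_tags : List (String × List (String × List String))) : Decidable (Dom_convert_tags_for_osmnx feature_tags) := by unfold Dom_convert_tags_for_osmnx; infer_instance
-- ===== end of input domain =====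

-- B replaces A's triple-nested per-value string growth by: pre-join each entry's values
-- into one chunk, group the flat chunk stream per key, then join once per key (alternative decomposition).

-- ===== PORT A =====
-- loop body: if tag_key in osmnx_tags: osmnx_tags[tag_key] += ";" + tag_value else: osmnx_tags[tag_key] = tag_value
def pvAstep (d : PySem.Dict String String) (tag_key tag_value : String) : PySem.Dict String String :=
  if d.contains tag_key then d.insert tag_key (d.getD tag_key "" ++ (";" ++ tag_value))
  else d.insert tag_key tag_value

def convert_tags_for_osmnx (feature_tags : List (String × List (String × List String))) : List (String × String) :=
  (feature_tags.foldl (fun d cat =>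
    cat.2.foldl (fun d kv =>
      kv.2.foldl (fun d tag_value => pvAstep d kv.1 tag_value) d) d) PySem.Dict.empty).items

-- ===== PORT B =====
-- chunks = [(k, ";".join(vs)) for tags_dict in feature_tags.values() for k, vs in tags_dict.items() if vs]
def pvChunks (feature_tags : List (String × List (String × List String))) : List (String × String) :=
  feature_tags.flatMap (fun cat =>
    (cat.2.filter (fun kv => !kv.2.isEmpty)).map (fun kv => (kv.1, PySem.Str.join ";" kv.2)))

-- loop body: grouped.setdefault(k, []).append(chunk)
def pvBstep (d : PySem.Dict String (List String)) (k c : String) : PySem.Dict String (List String) :=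
  d.modify k [] (· ++ [c])

def convert_tags_for_osmnx_alt (feature_tags : List (String × List (String × List String))) : List (String × String) :=
  (((pvChunks feature_tags).foldl (fun d p => pvBstep d p.1 p.2) PySem.Dict.empty).items).map
    (fun p => (p.1, PySem.Str.join ";" p.2))

-- ===== PRECONDITION & SPEC =====
def Spec_convert_tags_for_osmnx (feature_tags : List (String × List (String × List String))) (out : List (String × String)) : Prop := out = convert_tags_for_osmnx_alt feature_tags
instance (feature_tags : List (String × List (String × List String))) (out : List (String × String)) : Decidable (Spec_convert_tags_for_osmnx feature_tags out) := by unfold Spec_convert_tags_for_osmnx; infer_instance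

-- ===== CLAIM =====
def Claim_equal_convert_tags_for_osmnx : Prop := ∀ (feature_tags : List (String × List (String × List String))), Dom_convert_tags_for_osmnx feature_tags → Spec_convert_tags_for_osmnx feature_tags (convert_tags_for_osmnx feature_tags)

-- ===== LEMMAS AND PROOFS =====

theorem pvStrExt (a b : String) (h : a.toList = b.toList) : a = b := by
  have := congrArg String.ofList h; simpa using this

theorem pvJoinSingleton (v : String) : PySem.Str.join ";" [v] = v := by
  apply pvStrExt; simp [PySem.Str.toList_join]

theorem pvJoinCons (v : String) (vs : List String) (h : vs ≠ []) :
    PySem.Str.join ";" (v :: vs) = v ++ (";" ++ PySem.Str.join ";" vs) := by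
  apply pvStrExt
  cases vs with
  | nil => simp at h
  | cons w ws =>
    simp [PySem.Str.toList_join, PySem.Chars.join_cons_cons]

-- ";" ++ v₁ ++ ";" ++ v₂ ++ … , the suffix A's loop appends for the values vs
def pvT : List String → String
  | [] => ""
  | v :: vs => ";" ++ v ++ pvT vs

theorem pvT_eq_join (v : String) (vs : List String) :
    pvT (v :: vs) = ";" ++ PySem.Str.join ";" (v :: vs) := by
  induction vs generalizing v with
  | nil => simp [pvT, pvJoinSingleton]
  | cons w ws ih =>
    rw [pvT, ih w, pvJoinCons v (w :: ws) (by simp)]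
    simp [String.append_assoc]

theorem pvFoldContains (k : String) (vs : List String)
    (dA : PySem.Dict String String) (h : vs ≠ []) (hc : dA.contains k = true) :
    vs.foldl (fun d v => pvAstep d k v) dA = dA.insert k (dA.getD k "" ++ pvT vs) := by
  induction vs generalizing dA with
  | nil => simp at h
  | cons v rest ih =>
    have hstep : pvAstep dA k v = dA.insert k (dA.getD k "" ++ (";" ++ v)) := by
      simp [pvAstep, hc]
    cases rest with
    | nil =>
      simp only [List.foldl, hstep, pvT]
      congr 1
      simp
    | cons w ws =>
      rw [List.foldl_cons, hstep,
        ih _ (by simp) (by simp [PySem.Dict.contains_insert_self]),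
        PySem.Dict.getD_insert_self, PySem.Dict.insert_insert_self]
      congr 1
      simp [pvT, String.append_assoc]

theorem pvFoldChunk (k : String) (vs : List String)
    (dA : PySem.Dict String String) (h : vs ≠ []) :
    vs.foldl (fun d v => pvAstep d k v) dA = pvAstep dA k (PySem.Str.join ";" vs) := by
  by_cases hc : dA.contains k = true
  · rw [pvFoldContains k vs dA h hc]
    cases vs with
    | nil => simp at h
    | cons v rest =>
      simp only [pvAstep, hc, if_pos]
      rw [pvT_eq_join]
  · have hc' : dA.contains k = false := by simpa using hc
    cases vs with
    | nil => simp at h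
    | cons v rest =>
      rw [List.foldl_cons, show pvAstep dA k v = dA.insert k v by simp [pvAstep, hc']]
      cases rest with
      | nil => simp [pvAstep, hc', pvJoinSingleton]
      | cons w ws =>
        rw [pvFoldContains k (w :: ws) _ (by simp) (by simp [PySem.Dict.contains_insert_self]),
          PySem.Dict.getD_insert_self, PySem.Dict.insert_insert_self]
        simp only [pvAstep, hc', Bool.false_eq_true, if_false]
        congr 1
        rw [pvT_eq_join, pvJoinCons v (w :: ws) (by simp)]

-- A's inner two loops over one tags_dict process exactly its chunk stream
theorem pvATagsEq (tl : List (String × List String)) (dA : PySem.Dict String String) :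
    tl.foldl (fun d kv => kv.2.foldl (fun d v => pvAstep d kv.1 v) d) dA
      = ((tl.filter (fun kv => !kv.2.isEmpty)).map (fun kv => (kv.1, PySem.Str.join ";" kv.2))).foldl
          (fun d p => pvAstep d p.1 p.2) dA := by
  induction tl generalizing dA with
  | nil => rfl
  | cons kv rest ih =>
    cases hv : kv.2 with
    | nil =>
      rw [List.foldl_cons, hv, List.foldl_nil, ih]
      simp [hv]
    | cons v vs =>
      rw [List.foldl_cons, pvFoldChunk kv.1 kv.2 dA (by simp [hv]), ih]
      simp [hv]

theorem pvAFoldEq (l : List (String × List (String × List String))) (dA : PySem.Dict String String) :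
    l.foldl (fun d cat => cat.2.foldl (fun d kv => kv.2.foldl (fun d v => pvAstep d kv.1 v) d) d) dA
      = (pvChunks l).foldl (fun d p => pvAstep d p.1 p.2) dA := by
  induction l generalizing dA with
  | nil => rfl
  | cons cat rest ih =>
    rw [List.foldl_cons, pvATagsEq, ih]
    simp [pvChunks, List.foldl_append]

def pvJoinPair (p : String × List String) : String × String := (p.1, PySem.Str.join ";" p.2)

def pvRel (dA : PySem.Dict String String) (dB : PySem.Dict String (List String)) : Prop :=
  dA.items = dB.items.map pvJoinPair ∧ (∀ p ∈ dB.items, p.2 ≠ []) ∧ dB.keys.Nodup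

theorem pvRelKeys (dA : PySem.Dict String String) (dB : PySem.Dict String (List String))
    (h : pvRel dA dB) : dA.keys = dB.keys := by
  show dA.items.map (·.1) = dB.items.map (·.1)
  rw [h.1, List.map_map]
  rfl

theorem pvJoinAppend (l : List String) (v : String) (h : l ≠ []) :
    PySem.Str.join ";" (l ++ [v]) = PySem.Str.join ";" l ++ (";" ++ v) := by
  induction l with
  | nil => simp at h
  | cons a t ih =>
    cases t with
    | nil => simp [pvJoinSingleton, pvJoinCons]
    | cons b u =>
      rw [List.cons_append, pvJoinCons a ((b :: u) ++ [v]) (by simp), ih (by simp),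
        pvJoinCons a (b :: u) (by simp)]
      simp [String.append_assoc]

theorem pvStep (dA : PySem.Dict String String) (dB : PySem.Dict String (List String))
    (k v : String) (h : pvRel dA dB) : pvRel (pvAstep dA k v) (pvBstep dB k v) := by
  obtain ⟨hitems, hne, hnd⟩ := h
  have hk : dA.keys = dB.keys := pvRelKeys dA dB ⟨hitems, hne, hnd⟩
  have hndA : dA.keys.Nodup := hk ▸ hnd
  have hcc : dA.contains k = dB.contains k := by
    rw [PySem.Dict.contains_eq_decide_mem_keys, PySem.Dict.contains_eq_decide_mem_keys, hk]
  unfold pvAstep pvBstep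
  rw [show (PySem.Dict.modify dB k [] (· ++ [v])) = dB.insert k (dB.getD k [] ++ [v]) from rfl]
  by_cases hc : dB.contains k = true
  · rw [hcc, if_pos hc]
    refine ⟨?_, ?_, ?_⟩
    · rw [PySem.Dict.items_insert_of_contains _ _ hc,
        PySem.Dict.items_insert_of_contains _ _ (hcc ▸ hc), hitems, List.map_map, List.map_map]
      apply List.map_congr_left
      intro p hp
      simp only [Function.comp, pvJoinPair]
      by_cases hpk : p.1 == k
      · have hp1 : p.1 = k := by simpa using hpk
        have hmemB : (k, p.2) ∈ dB.items := by rw [← hp1]; exact hp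
        have hgB : dB.getD k [] = p.2 := PySem.Dict.getD_of_mem_items _ hmemB hnd []
        have hmemA : (k, PySem.Str.join ";" p.2) ∈ dA.items := by
          rw [hitems, ← hp1]
          exact List.mem_map_of_mem hp
        have hgA : dA.getD k "" = PySem.Str.join ";" p.2 :=
          PySem.Dict.getD_of_mem_items _ hmemA hndA ""
        simp only [hpk, if_pos, hgA, hgB]
        rw [pvJoinAppend p.2 v (hne p hp)]
      · simp only [hpk, Bool.false_eq_true, if_false]
    · intro p hp
      rw [PySem.Dict.items_insert_of_contains _ _ hc] at hp
      obtain ⟨q, hq, rfl⟩ := List.mem_map.1 hp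
      by_cases hqk : q.1 == k
      · simp only [hqk, if_pos]
        simp
      · simp only [hqk, Bool.false_eq_true, if_false]
        exact hne q hq
    · exact PySem.Dict.nodup_keys_insert _ _ _ hnd
  · have hc' : dB.contains k = false := by simpa using hc
    rw [hcc, if_neg (by simp [hc'])]
    refine ⟨?_, ?_, ?_⟩
    · rw [PySem.Dict.items_insert_of_not_contains _ _ hc',
        PySem.Dict.items_insert_of_not_contains _ _ (by rw [hcc]; exact hc'),
        hitems, List.map_append, PySem.Dict.getD_of_not_contains _ [] hc']
      simp [pvJoinPair, pvJoinSingleton]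
    · intro p hp
      rw [PySem.Dict.items_insert_of_not_contains _ _ hc'] at hp
      rcases List.mem_append.1 hp with hp | hp
      · exact hne p hp
      · simp at hp
        subst hp
        simp
    · exact PySem.Dict.nodup_keys_insert _ _ _ hnd

theorem pvPairsFold (ps : List (String × String))
    (dA : PySem.Dict String String) (dB : PySem.Dict String (List String)) (h : pvRel dA dB) :
    pvRel (ps.foldl (fun d p => pvAstep d p.1 p.2) dA) (ps.foldl (fun d p => pvBstep d p.1 p.2) dB) := by
  induction ps generalizing dA dB with
  | nil => exact h
  | cons x t ih => exact ih _ _ (pvStep dA dB x.1 x.2 h)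

theorem pvRelEmpty : pvRel PySem.Dict.empty PySem.Dict.empty := by
  refine ⟨rfl, by intro p hp; simp [PySem.Dict.empty] at hp, ?_⟩
  exact PySem.Dict.nodup_keys_empty

-- ===== VERDICT =====
theorem convert_tags_for_osmnx_spec : Claim_equal_convert_tags_for_osmnx := by
  intro feature_tags _
  show convert_tags_for_osmnx feature_tags = convert_tags_for_osmnx_alt feature_tags
  unfold convert_tags_for_osmnx convert_tags_for_osmnx_alt
  rw [pvAFoldEq]
  exact (pvPairsFold (pvChunks feature_tags) _ _ pvRelEmpty).1
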